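-- pv_equiv track=rewrite | github.com/AstroMash/comfyui-orbitals | tiling/strategies.py | compute_tile_positions
-- ===== SOURCE A (Python) =====
-- import math
--
-- def compute_tile_positions(image_size: int, tile_size: int, overlap: int) -> list[int]:
--     """Clamped-to-bounds tile placement.  **No slivers.**
--
--     The last tile's start is clamped to ``image_size - tile_size`` so every
--     tile is exactly ``tile_size`` pixels.  The penultimate–last overlap may
--     exceed *overlap*, but the blending masks handle that gracefully.
--     """
--     if tile_size >= image_size:
--         return [0]
--
--     stride = tile_size - overlap
--     if stride <= 0:
--         raise ValueError(
--             f"overlap ({overlap}) must be smaller than tile_size ({tile_size})"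
--         )
--
--     n = max(1, math.ceil((image_size - tile_size) / stride) + 1)
--     positions: list[int] = []
--     for i in range(n):
--         pos = min(i * stride, image_size - tile_size)
--         positions.append(pos)
--
--     # Deduplicate in case clamping creates duplicates at the end.
--     seen: set[int] = set()
--     unique: list[int] = []
--     for p in positions:
--         if p not in seen:
--             seen.add(p)
--             unique.append(p)
--     return unique
-- ===== SOURCE B (Python) =====
-- def compute_tile_positions(image_size: int, tile_size: int, overlap: int) -> list[int]:
--     """Clamped-to-bounds tile placement: stride multiples below the last
--     clamped start, then the clamped last start itself."""
--     if tile_size >= image_size: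
--         return [0]
--     stride = tile_size - overlap
--     if stride <= 0:
--         raise ValueError(
--             f"overlap ({overlap}) must be smaller than tile_size ({tile_size})"
--         )
--     last = image_size - tile_size
--     return list(range(0, last, stride)) + [last]
-- ===== Notes on version B (the rewrite author's own statement) =====
-- stated objective: simpler
-- what changed: Replaces A's ceil-based tile count, per-index min-clamp loop and set-based dedup pass with a direct construction list(range(0, image_size - tile_size, stride)) + [image_size - tile_size].
import Mathlib
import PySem

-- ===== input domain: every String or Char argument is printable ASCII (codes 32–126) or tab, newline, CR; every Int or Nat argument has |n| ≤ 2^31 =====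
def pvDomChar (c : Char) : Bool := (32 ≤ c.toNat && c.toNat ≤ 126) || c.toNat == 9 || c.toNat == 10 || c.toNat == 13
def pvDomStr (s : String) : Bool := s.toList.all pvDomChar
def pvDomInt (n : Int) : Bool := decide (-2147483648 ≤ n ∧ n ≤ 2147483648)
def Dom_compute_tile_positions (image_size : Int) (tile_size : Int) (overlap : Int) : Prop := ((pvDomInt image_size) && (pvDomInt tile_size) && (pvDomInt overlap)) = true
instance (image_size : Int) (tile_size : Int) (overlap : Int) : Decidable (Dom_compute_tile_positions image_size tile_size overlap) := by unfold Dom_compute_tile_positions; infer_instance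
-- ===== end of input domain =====

-- B replaces A's ceil-count loop with min-clamping plus a dedup pass by range(0, last, stride) ++ [last] (simpler decomposition; return-value equivalence).

-- ===== PORT A =====
-- math.ceil((image_size - tile_size) / stride) uses float division in Python; on the stated
-- domain (|ints| ≤ 2^31) the float result never crosses an integer boundary, so it equals the
-- exact ceiling division, ported here as -((-M) // stride).
def compute_tile_positions (image_size : Int) (tile_size : Int) (overlap : Int) : List Int :=
  if tile_size ≥ image_size then [0]
  else
    let stride := tile_size - overlap
    -- stride ≤ 0: Python raises ValueError here (excluded by Pre_)
    let n : Int := max 1 (-(PySem.Int.floordiv (-(image_size - tile_size)) stride) + 1)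
    let positions : List Int :=
      (PySem.List.pyRange 0 n 1).foldl
        (fun acc i => acc ++ [min (i * stride) (image_size - tile_size)]) []
    (positions.foldl
      (fun (su : PySem.Set Int × List Int) p =>
        if p ∈ su.1 then su else (PySem.Set.add su.1 p, su.2 ++ [p]))
      (PySem.Set.empty, [])).2

-- ===== PORT B =====
def compute_tile_positions_alt (image_size : Int) (tile_size : Int) (overlap : Int) : List Int :=
  if tile_size ≥ image_size then [0]
  else
    let stride := tile_size - overlap
    -- stride ≤ 0: B raises the same ValueError (excluded by Pre_)
    let last := image_size - tile_size
    PySem.List.pyRange 0 last stride ++ [last]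

-- ===== PRECONDITION & SPEC =====
-- Pre_ excludes exactly the inputs where A (and B) raise ValueError: tile_size < image_size with stride = tile_size - overlap ≤ 0.
def Pre_compute_tile_positions (image_size : Int) (tile_size : Int) (overlap : Int) : Prop :=
  image_size ≤ tile_size ∨ overlap < tile_size
instance (image_size : Int) (tile_size : Int) (overlap : Int) : Decidable (Pre_compute_tile_positions image_size tile_size overlap) := by unfold Pre_compute_tile_positions; infer_instance

def pvWitness_compute_tile_positions : Int × Int × Int := (10, 4, 1)

def Spec_compute_tile_positions (image_size : Int) (tile_size : Int) (overlap : Int) (out : List Int) : Prop := out = compute_tile_positions_alt image_size tile_size overlap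
instance (image_size : Int) (tile_size : Int) (overlap : Int) (out : List Int) : Decidable (Spec_compute_tile_positions image_size tile_size overlap out) := by unfold Spec_compute_tile_positions; infer_instance

-- ===== CLAIM (what is proved, stated in full; the proofs are below) =====
def Claim_equal_compute_tile_positions : Prop := ∀ (image_size : Int) (tile_size : Int) (overlap : Int), Dom_compute_tile_positions image_size tile_size overlap → Pre_compute_tile_positions image_size tile_size overlap → Spec_compute_tile_positions image_size tile_size overlap (compute_tile_positions image_size tile_size overlap)

-- ===== LEMMAS AND PROOFS =====

-- A's dedup pass is the identity on a list without duplicates (invariant of the fold).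
lemma dedup_fold_nodup (l : List Int) (s : PySem.Set Int) (acc : List Int)
    (hd : ∀ x ∈ l, x ∉ s) (hn : l.Nodup) :
    (l.foldl
      (fun (su : PySem.Set Int × List Int) p =>
        if p ∈ su.1 then su else (PySem.Set.add su.1 p, su.2 ++ [p])) (s, acc)).2
      = acc ++ l := by
  induction l generalizing s acc with
  | nil => simp
  | cons x t ih =>
    have hx : x ∉ s := hd x (by simp)
    rw [List.foldl_cons, if_neg hx]
    rw [ih (PySem.Set.add s x) (acc ++ [x])
      (fun y hy => by
        rw [PySem.Set.mem_add]
        push Not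
        exact ⟨hd y (by simp [hy]), fun h => (List.nodup_cons.mp hn).1 (h ▸ hy)⟩)
      (List.nodup_cons.mp hn).2]
    simp

lemma core_eq (image_size tile_size overlap : Int)
    (hlt : tile_size < image_size) (hs : 0 < tile_size - overlap) :
    compute_tile_positions image_size tile_size overlap
      = compute_tile_positions_alt image_size tile_size overlap := by
  unfold compute_tile_positions compute_tile_positions_alt
  rw [if_neg (by omega), if_neg (by omega)]
  simp only []
  set stride := tile_size - overlap with hstride
  set M := image_size - tile_size with hM
  have hMpos : 0 < M := by omega
  set c : Int := -(PySem.Int.floordiv (-M) stride) with hc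
  have hcb : (c - 1) * stride < M ∧ M ≤ c * stride :=
    (PySem.Int.neg_floordiv_neg_eq_iff_of_pos hs).mp rfl
  have hc1 : 1 ≤ c := by nlinarith [hcb.2, hMpos, hs]
  have hmax : max 1 (c + 1) = c + 1 := by omega
  -- the position-building loop is a map over the index range
  rw [hmax, PySem.List.foldl_append_singleton_eq_map, List.nil_append]
  -- split off the last (clamped) index
  rw [PySem.List.pyRange_one_succ_right (by omega : (0:Int) ≤ c), List.map_append]
  have hlast : min (c * stride) M = M := min_eq_right hcb.2
  -- interior indices are never clamped
  have hmapcongr : (PySem.List.pyRange 0 c 1).map (fun i => min (i * stride) M)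
      = (PySem.List.pyRange 0 c 1).map (fun i => i * stride) := by
    apply List.map_congr_left
    intro i hi
    rcases (PySem.List.mem_pyRange_one).mp hi with ⟨hi0, hic⟩
    have : i * stride ≤ (c - 1) * stride :=
      mul_le_mul_of_nonneg_right (by omega) (le_of_lt hs)
    exact min_eq_left (by omega)
  -- the unclamped positions are exactly range(0, M, stride)
  have hq : (M - 0 + stride - 1) / stride = c := by
    have hdiv := Int.mul_ediv_add_emod (M - 0 + stride - 1) stride
    have hr1 := Int.emod_nonneg (M - 0 + stride - 1) (ne_of_gt hs)
    have hr2 := Int.emod_lt_of_pos (M - 0 + stride - 1) hs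
    set q : Int := (M - 0 + stride - 1) / stride with hqdef
    have hq1 : (q - 1) * stride < M := by nlinarith
    have hq2 : M ≤ q * stride := by nlinarith
    by_contra hne
    rcases lt_or_gt_of_ne hne with h | h
    · have h' : q ≤ c - 1 := by omega
      have := mul_le_mul_of_nonneg_right h' (le_of_lt hs)
      linarith [hcb.1, hq2]
    · have h' : c ≤ q - 1 := by omega
      have := mul_le_mul_of_nonneg_right h' (le_of_lt hs)
      linarith [hq1, hcb.2]
  have hrange : PySem.List.pyRange 0 M stride
      = (PySem.List.pyRange 0 c 1).map (fun i => i * stride) := by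
    rw [PySem.List.pyRange_of_pos 0 M hs, if_pos (by omega : (0:Int) < M), hq,
      PySem.List.pyRange_one, List.map_map]
    have hc0 : c - 0 = c := by ring
    rw [hc0]
    congr 1
    funext k
    simp [mul_comm]
  -- the built list has no duplicates, so the dedup pass returns it unchanged
  have hnodup : ((PySem.List.pyRange 0 M stride) ++ [M]).Nodup := by
    have hnd : (PySem.List.pyRange 0 M stride).Nodup := by
      rw [hrange]
      exact (PySem.List.nodup_pyRange_one 0 c).map
        (fun a b hab => mul_right_cancel₀ (ne_of_gt hs) hab)
    have hmem : M ∉ PySem.List.pyRange 0 M stride := by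
      intro h
      rcases (PySem.List.mem_pyRange_iff_of_pos hs M).mp h with ⟨_, hlt', _⟩
      omega
    rw [List.nodup_append]
    refine ⟨hnd, List.nodup_singleton M, fun a ha b hb => ?_⟩
    simp only [List.mem_singleton] at hb
    intro h
    exact hmem ((hb ▸ h) ▸ ha)
  rw [hmapcongr]
  simp only [List.map_cons, List.map_nil]
  rw [hlast, ← hrange]
  exact dedup_fold_nodup _ _ _ (fun x _ => by simp [PySem.Set.empty]) hnodup

-- ===== VERDICT (by name: the statement is the Claim_ definition above) =====
theorem compute_tile_positions_spec : Claim_equal_compute_tile_positions := by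
  intro image_size tile_size overlap _ hpre
  unfold Spec_compute_tile_positions
  by_cases h : tile_size ≥ image_size
  · unfold compute_tile_positions compute_tile_positions_alt
    rw [if_pos h, if_pos h]
  · have hs : 0 < tile_size - overlap := by
      rcases hpre with h1 | h2
      · omega
      · omega
    exact core_eq image_size tile_size overlap (by omega) hs
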